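-- pv_equiv track=rewrite | github.com/dronan/gramar-check | grammar_checker.py | _spelling_heuristic
-- ===== SOURCE A (Python) =====
-- def _spelling_heuristic(error: str, replacement: str) -> str | None:
--     """Return 'Spelling' if error looks like a typo of replacement, else None."""
--     a, b = error.lower(), replacement.lower()
--     if a == b:
--         return None
--     # Simple edit distance (Levenshtein)
--     m, n = len(a), len(b)
--     dp = list(range(n + 1))
--     for i in range(1, m + 1):
--         prev, dp[0] = dp[0], i
--         for j in range(1, n + 1):
--             temp = dp[j]
--             dp[j] = prev if a[i-1] == b[j-1] else 1 + min(prev, dp[j], dp[j-1])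
--             prev = temp
--     dist = dp[n]
--     threshold = max(2, int(max(m, n) * 0.45))
--     return "Spelling" if dist <= threshold else None
-- ===== SOURCE B (Python) =====
-- def _spelling_heuristic(error: str, replacement: str) -> str | None:
--     """Return 'Spelling' if error looks like a typo of replacement, else None."""
--     a, b = error.lower(), replacement.lower()
--     if a == b:
--         return None
--     m, n = len(a), len(b)
--     # Levenshtein via anti-diagonal (wavefront) dynamic programming over a memo
--     # table: cells are filled in order of i + j, each from already-filled cells.
--     memo = {}
--     for d in range(m + n + 1):
--         for i in range(max(0, d - n), min(m, d) + 1):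
--             j = d - i
--             if i == 0:
--                 memo[(i, j)] = j
--             elif j == 0:
--                 memo[(i, j)] = i
--             elif a[i-1] == b[j-1]:
--                 memo[(i, j)] = memo[(i-1, j-1)]
--             else:
--                 memo[(i, j)] = 1 + min(memo[(i-1, j-1)], memo[(i-1, j)], memo[(i, j-1)])
--     dist = memo[(m, n)]
--     threshold = max(2, int(max(m, n) * 0.45))
--     return "Spelling" if dist <= threshold else None
-- ===== Notes on version B (the rewrite author's own statement) =====
-- stated objective: alternative
-- what changed: Replaced A's in-place rolling single-row DP (row-major index loops with the prev/temp juggling) by an anti-diagonal wavefront DP that fills a (i,j)-keyed memo table in order of i+j, keeping the same lowercase/equality guard and threshold logic.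
import Mathlib
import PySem

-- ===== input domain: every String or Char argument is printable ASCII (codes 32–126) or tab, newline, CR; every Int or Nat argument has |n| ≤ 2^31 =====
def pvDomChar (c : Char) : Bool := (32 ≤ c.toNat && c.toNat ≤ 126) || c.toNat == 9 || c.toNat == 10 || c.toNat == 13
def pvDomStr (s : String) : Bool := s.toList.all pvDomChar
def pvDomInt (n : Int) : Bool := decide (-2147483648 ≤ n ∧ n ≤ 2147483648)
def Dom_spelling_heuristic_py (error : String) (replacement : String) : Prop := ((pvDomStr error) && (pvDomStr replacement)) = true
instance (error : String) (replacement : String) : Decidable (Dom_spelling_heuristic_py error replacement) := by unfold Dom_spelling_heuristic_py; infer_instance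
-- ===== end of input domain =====

-- B replaces A's in-place rolling-row Levenshtein DP with an anti-diagonal (wavefront)
-- DP over a memo table keyed by (i, j); objective: alternative (same asymptotic cost).
-- In both ports 'int(max(m,n)*0.45)' is modelled as '9 * max m n / 20', which is the exact
-- value Python's float computation yields for every length in scope.

-- ===== PORT A =====
-- inner 'for j in range(1, n+1)' loop of A (in-place update of dp with the rolling 'prev')
def pvLoopJA (la lb : List Char) (i j n : Nat) (dp : List Nat) (prev : Nat) : List Nat :=
  if j ≤ n then
    let temp := dp.getD j 0
    let dpj := if la.getD (i-1) ' ' == lb.getD (j-1) ' ' then prev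
               else 1 + min prev (min (dp.getD j 0) (dp.getD (j-1) 0))
    pvLoopJA la lb i (j+1) n (dp.set j dpj) temp
  else dp
termination_by n + 1 - j
decreasing_by omega

-- outer 'for i in range(1, m+1)' loop of A
def pvLoopIA (la lb : List Char) (i m n : Nat) (dp : List Nat) : List Nat :=
  if i ≤ m then
    let prev := dp.getD 0 0
    pvLoopIA la lb (i+1) m n (pvLoopJA la lb i 1 n (dp.set 0 i) prev)
  else dp
termination_by m + 1 - i
decreasing_by omega

def spelling_heuristic_py (error : String) (replacement : String) : Option String :=
  let a := PySem.Chars.lower error.toList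
  let b := PySem.Chars.lower replacement.toList
  if a == b then none
  else
    let m := a.length
    let n := b.length
    let dp := pvLoopIA a b 1 m n (List.range (n+1))
    let dist := dp.getD n 0
    let threshold := max 2 (9 * max m n / 20)
    if dist ≤ threshold then some "Spelling" else none

-- ===== PORT B =====
-- one cell of B's memo table (the if/elif chain of B's inner loop body)
def pvCellB (la lb : List Char) (memo : PySem.Dict (Nat × Nat) Nat) (i j : Nat) : Nat :=
  if i = 0 then j
  else if j = 0 then i
  else if la.getD (i-1) ' ' == lb.getD (j-1) ' ' then memo.getD (i-1, j-1) 0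
  else 1 + min (memo.getD (i-1, j-1) 0) (min (memo.getD (i-1, j) 0) (memo.getD (i, j-1) 0))

-- inner 'for i in range(max(0, d-n), min(m, d)+1)' loop along one anti-diagonal
def pvInnerB (la lb : List Char) (d i hi : Nat) (memo : PySem.Dict (Nat × Nat) Nat) :
    PySem.Dict (Nat × Nat) Nat :=
  if i ≤ hi then
    pvInnerB la lb d (i+1) hi (memo.insert (i, d-i) (pvCellB la lb memo i (d-i)))
  else memo
termination_by hi + 1 - i
decreasing_by omega

-- outer 'for d in range(m+n+1)' wavefront loop
def pvOuterB (la lb : List Char) (m n d : Nat) (memo : PySem.Dict (Nat × Nat) Nat) :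
    PySem.Dict (Nat × Nat) Nat :=
  if d ≤ m + n then
    pvOuterB la lb m n (d+1) (pvInnerB la lb d (d-n) (min m d) memo)
  else memo
termination_by m + n + 1 - d
decreasing_by omega

def spelling_heuristic_py_alt (error : String) (replacement : String) : Option String :=
  let a := PySem.Chars.lower error.toList
  let b := PySem.Chars.lower replacement.toList
  if a == b then none
  else
    let m := a.length
    let n := b.length
    let memo := pvOuterB a b m n 0 PySem.Dict.empty
    let dist := memo.getD (m, n) 0
    let threshold := max 2 (9 * max m n / 20)
    if dist ≤ threshold then some "Spelling" else none

-- ===== PRECONDITION & SPEC =====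
def Spec_spelling_heuristic_py (error : String) (replacement : String) (out : Option String) : Prop := out = spelling_heuristic_py_alt error replacement
instance (error : String) (replacement : String) (out : Option String) : Decidable (Spec_spelling_heuristic_py error replacement out) := by unfold Spec_spelling_heuristic_py; infer_instance

-- ===== CLAIM (what is proved, stated in full; the proofs are below) =====
def Claim_equal_spelling_heuristic_py : Prop := ∀ (error : String) (replacement : String), Dom_spelling_heuristic_py error replacement → Spec_spelling_heuristic_py error replacement (spelling_heuristic_py error replacement)

-- ===== LEMMAS AND PROOFS =====

-- reference Levenshtein recurrence on prefix lengths (proof-side spec only)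
def pvE (la lb : List Char) : Nat → Nat → Nat
  | 0, j => j
  | i+1, 0 => i+1
  | i+1, j+1 =>
      if la.getD i ' ' == lb.getD j ' ' then pvE la lb i j
      else 1 + min (pvE la lb i j) (min (pvE la lb i (j+1)) (pvE la lb (i+1) j))
termination_by i j => (i, j)

theorem pvLoopJA_spec (la lb : List Char) (n i : Nat) (hi : 1 ≤ i) :
    ∀ j dp prev, 1 ≤ j → dp.length = n + 1 →
    (∀ k, k < j → k ≤ n → dp.getD k 0 = pvE la lb i k) →
    (∀ k, j ≤ k → k ≤ n → dp.getD k 0 = pvE la lb (i-1) k) →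
    prev = pvE la lb (i-1) (j-1) →
    ∀ k, k ≤ n → (pvLoopJA la lb i j n dp prev).getD k 0 = pvE la lb i k := by
  obtain ⟨i', rfl⟩ : ∃ i', i = i' + 1 := ⟨i - 1, by omega⟩
  intro j dp prev h1 hlen hlt hge hprev k hk
  induction hfuel : n + 1 - j generalizing j dp prev with
  | zero =>
    have hj : ¬ j ≤ n := by omega
    rw [pvLoopJA, if_neg hj]
    exact hlt k (by omega) hk
  | succ f ih =>
    have hj : j ≤ n := by omega
    obtain ⟨j', rfl⟩ : ∃ j', j = j' + 1 := ⟨j - 1, by omega⟩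
    rw [pvLoopJA, if_pos hj]
    simp only [Nat.add_sub_cancel] at hprev ⊢
    have hdpj : (if la.getD i' ' ' == lb.getD j' ' ' then prev
        else 1 + min prev (min (dp.getD (j'+1) 0) (dp.getD j' 0))) = pvE la lb (i'+1) (j'+1) := by
      rw [pvE]
      have hup : dp.getD (j'+1) 0 = pvE la lb i' (j'+1) := by
        have := hge (j'+1) le_rfl hj
        simpa using this
      have hleft : dp.getD j' 0 = pvE la lb (i'+1) j' := hlt j' (by omega) (by omega)
      have hdiag : prev = pvE la lb i' j' := by simpa using hprev
      rw [hup, hleft, hdiag]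
    rw [hdpj]
    apply ih (j'+1+1) (dp.set (j'+1) (pvE la lb (i'+1) (j'+1)))
    · omega
    · simpa using hlen
    · intro k hk1 hk2
      rcases Nat.lt_or_ge k (j'+1) with h | h
      · rw [List.getD_eq_getElem?_getD, List.getElem?_set_ne (by omega),
            ← List.getD_eq_getElem?_getD]
        exact hlt k (by omega) hk2
      · have : k = j' + 1 := by omega
        subst this
        rw [List.getD_eq_getElem?_getD, List.getElem?_set_self (by omega), Option.getD_some]
    · intro k hk1 hk2
      rw [List.getD_eq_getElem?_getD, List.getElem?_set_ne (by omega),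
          ← List.getD_eq_getElem?_getD]
      exact hge k (by omega) hk2
    · simp only [Nat.add_sub_cancel]
      have := hge (j'+1) le_rfl hj
      simpa using this
    · omega
theorem pvLoopJA_length (la lb : List Char) (i n : Nat) :
    ∀ j dp prev, (pvLoopJA la lb i j n dp prev).length = dp.length := by
  intro j dp prev
  fun_induction pvLoopJA la lb i j n dp prev with
  | case1 => simp_all
  | case2 => simp [*]

theorem pvLoopIA_spec (la lb : List Char) (m n : Nat) :
    ∀ i dp, 1 ≤ i → i ≤ m + 1 → dp.length = n + 1 →
    (∀ k, k ≤ n → dp.getD k 0 = pvE la lb (i-1) k) →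
    ∀ k, k ≤ n → (pvLoopIA la lb i m n dp).getD k 0 = pvE la lb m k := by
  intro i dp h1 hle hlen hrow k hk
  induction hfuel : m + 1 - i generalizing i dp with
  | zero =>
    have hi : ¬ i ≤ m := by omega
    rw [pvLoopIA, if_neg hi]
    have : i - 1 = m := by omega
    rw [← this]
    exact hrow k hk
  | succ f ih =>
    have hi : i ≤ m := by omega
    rw [pvLoopIA, if_pos hi]
    apply ih (i+1)
    · omega
    · omega
    · rw [pvLoopJA_length]; simpa using hlen
    · intro k' hk'
      simp only [Nat.add_sub_cancel]
      apply pvLoopJA_spec la lb n i h1 1 _ _ le_rfl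
      · simpa using hlen
      · intro k'' hk1 hk2
        have : k'' = 0 := by omega
        subst this
        rw [List.getD_eq_getElem?_getD, List.getElem?_set_self (by omega), Option.getD_some]
        cases i with
        | zero => omega
        | succ i'' => rw [pvE]
      · intro k'' hk1 hk2
        rw [List.getD_eq_getElem?_getD, List.getElem?_set_ne (by omega),
            ← List.getD_eq_getElem?_getD]
        exact hrow k'' hk2
      · simpa using hrow 0 (by omega)
      · exact hk'
    · omega

theorem distA (la lb : List Char) :
    (pvLoopIA la lb 1 la.length lb.length (List.range (lb.length + 1))).getD lb.length 0
      = pvE la lb la.length lb.length := by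
  apply pvLoopIA_spec la lb la.length lb.length 1 _ le_rfl (by omega) (by simp)
  · intro k hk
    rw [List.getD_eq_getElem?_getD, List.getElem?_range (by omega), Option.getD_some]
    rw [pvE]
  · exact le_rfl
theorem pvInnerB_spec (la lb : List Char) (m n d : Nat) :
    ∀ i0 memo, d - n ≤ i0 →
    (∀ p q, p ≤ m → q ≤ n → (p + q < d ∨ (p + q = d ∧ p < i0)) →
        memo.getD (p, q) 0 = pvE la lb p q) →
    ∀ p q, p ≤ m → q ≤ n → p + q ≤ d →
        (pvInnerB la lb d i0 (min m d) memo).getD (p, q) 0 = pvE la lb p q := by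
  intro i0 memo hlo H p q hp hq hpq
  induction hfuel : min m d + 1 - i0 generalizing i0 memo with
  | zero =>
    have hi : ¬ i0 ≤ min m d := by omega
    rw [pvInnerB, if_neg hi]
    rcases Nat.lt_or_ge (p + q) d with h | h
    · exact H p q hp hq (Or.inl h)
    · exact H p q hp hq (Or.inr ⟨by omega, by omega⟩)
  | succ f ih =>
    have hi : i0 ≤ min m d := by omega
    rw [pvInnerB, if_pos hi]
    have hj : d - i0 ≤ n := by omega
    have hij : i0 + (d - i0) = d := by omega
    have him : i0 ≤ m := by omega
    have hval : pvCellB la lb memo i0 (d - i0) = pvE la lb i0 (d - i0) := by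
      unfold pvCellB
      rcases Nat.eq_zero_or_pos i0 with h0 | h0
      · subst h0; rw [if_pos rfl, pvE]
      · rw [if_neg (by omega)]
        rcases Nat.eq_zero_or_pos (d - i0) with hq0 | hq0
        · rw [hq0, if_pos rfl]
          obtain ⟨i', rfl⟩ : ∃ i', i0 = i' + 1 := ⟨i0 - 1, by omega⟩
          rw [pvE]
        · rw [if_neg (by omega)]
          obtain ⟨i', rfl⟩ : ∃ i', i0 = i' + 1 := ⟨i0 - 1, by omega⟩
          obtain ⟨j', hj'⟩ : ∃ j', d - (i' + 1) = j' + 1 := ⟨d - (i' + 1) - 1, by omega⟩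
          rw [hj']
          simp only [Nat.add_sub_cancel]
          have hdiag := H i' j' (by omega) (by omega) (Or.inl (by omega))
          have hup := H i' (j' + 1) (by omega) (by omega) (Or.inl (by omega))
          have hleft := H (i' + 1) j' (by omega) (by omega) (Or.inl (by omega))
          rw [hdiag, hup, hleft, pvE]
    rw [hval]
    apply ih (i0 + 1) _ (by omega) _ (by omega)
    intro p' q' hp' hq' hcond
    rw [PySem.Dict.getD_insert]
    split
    · rename_i heq
      have h1 : p' = i0 := by exact congrArg Prod.fst heq
      have h2 : q' = d - i0 := by exact congrArg Prod.snd heq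
      subst h1; subst h2
      rfl
    · rename_i hne
      apply H p' q' hp' hq'
      rcases hcond with h | ⟨hsum, hlt⟩
      · exact Or.inl h
      · refine Or.inr ⟨hsum, ?_⟩
        rcases Nat.lt_or_ge p' i0 with h | h
        · exact h
        · exfalso; apply hne
          have : p' = i0 := by omega
          subst this
          have : q' = d - p' := by omega
          rw [this]

theorem pvOuterB_spec (la lb : List Char) (m n : Nat) :
    ∀ d memo,
    (∀ p q, p ≤ m → q ≤ n → p + q < d → memo.getD (p, q) 0 = pvE la lb p q) →
    ∀ p q, p ≤ m → q ≤ n → (pvOuterB la lb m n d memo).getD (p, q) 0 = pvE la lb p q := by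
  intro d memo H p q hp hq
  induction hfuel : m + n + 1 - d generalizing d memo with
  | zero =>
    have hd : ¬ d ≤ m + n := by omega
    rw [pvOuterB, if_neg hd]
    exact H p q hp hq (by omega)
  | succ f ih =>
    have hd : d ≤ m + n := by omega
    rw [pvOuterB, if_pos hd]
    apply ih (d+1) _ _ (by omega)
    intro p' q' hp' hq' hlt
    apply pvInnerB_spec la lb m n d (d - n) memo le_rfl _ p' q' hp' hq' (by omega)
    intro p'' q'' hp'' hq'' hcond
    apply H p'' q'' hp'' hq''
    rcases hcond with h | ⟨hsum, hlt'⟩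
    · exact h
    · omega

theorem distB (la lb : List Char) :
    (pvOuterB la lb la.length lb.length 0 PySem.Dict.empty).getD (la.length, lb.length) 0
      = pvE la lb la.length lb.length := by
  apply pvOuterB_spec la lb la.length lb.length 0 PySem.Dict.empty _ _ _ le_rfl le_rfl
  intro p q _ _ h
  omega

-- ===== VERDICT (by name: the statement is the Claim_ definition above) =====
theorem spelling_heuristic_py_spec : Claim_equal_spelling_heuristic_py := by
  intro error replacement _
  unfold Spec_spelling_heuristic_py spelling_heuristic_py spelling_heuristic_py_alt
  simp only
  split
  · rfl
  · rw [distA, distB]
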